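-- pv_equiv track=rewrite | github.com/rietveldd92-crypto/sport-coach | agents/week_planner.py | _select_strength_days
-- ===== SOURCE A (Python) =====
-- DAYS_NL = ["maandag", "dinsdag", "woensdag", "donderdag", "vrijdag", "zaterdag", "zondag"]
--
-- def _select_strength_days(all_sessions: list, long_run_dag: str) -> list[str]:
--     """Kies kracht-dagen volgens twee regels:
--
--     1. NOOIT op de dag VOOR een zware sessie (kracht voor zwaar = slechte staat).
--     2. NOOIT 2 dagen achter elkaar (48u herstel tussen kracht-sessies).
--
--     Algoritme:
--     - Verzamel hard_days (TSS >= 70 of sacred/threshold/drempel/intervals).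
--     - Forbidden = dag-voor-elke-hard-dag + long_run_dag.
--     - Kies uit overige dagen: max 3 sessies, minimum 2 dagen gap.
--     """
--     sessions_by_day: dict[str, list] = {}
--     for s in all_sessions:
--         sessions_by_day.setdefault(s["dag"], []).append(s)
--
--     # "Hard" voor kracht-placement = ALLEEN interval-/drempelsessies.
--     # Lange continue duurritten (long_slow, long_endurance, fatmax, lange duurloop)
--     # zijn aerobe motor — geen explosief/excentrisch werk dat kracht conflicteert.
--     hard_keywords = ("threshold", "drempel", "marathon_tempo", "tempo_duurloop",
--                      "cp_intervals", "vo2max", "interval", "over_unders",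
--                      "over-unders", "pyramide", "surges", "vo2", "sweetspot")
--
--     def _day_is_hard(dag: str) -> bool:
--         # Alleen interval-/drempelsessies tellen als "hard" voor kracht-placement.
--         # TSS alleen is geen criterium: een 165 min long_slow heeft TSS 120 maar
--         # is puur aeroob — kracht ervoor is prima.
--         for s in sessions_by_day.get(dag, []):
--             sessie_type = (s.get("type") or "").lower()
--             naam = (s.get("naam") or "").lower()
--             if any(k in sessie_type or k in naam for k in hard_keywords):
--                 return True
--         return False
--
--     forbidden: set[str] = set()
--     if long_run_dag:
--         forbidden.add(long_run_dag)
--     for i, dag in enumerate(DAYS_NL):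
--         if _day_is_hard(dag):
--             # Hard day zelf: ambigu of kracht voor of na de sessie zit.
--             # Conservatief: blokker de dag zelf óók.
--             forbidden.add(dag)
--             if i > 0:
--                 forbidden.add(DAYS_NL[i - 1])  # dag VOOR een zware sessie
--
--     # Kandidaten: dagen die niet forbidden zijn, met spreiding ≥ 2 dagen
--     candidates: list[str] = []
--     last_picked_idx = -10
--     for i, dag in enumerate(DAYS_NL):
--         if dag in forbidden:
--             continue
--         if i - last_picked_idx >= 2:
--             candidates.append(dag)
--             last_picked_idx = i
--         if len(candidates) >= 3:
--             break
--     return candidates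
-- ===== SOURCE B (Python) =====
-- DAYS_NL = ["maandag", "dinsdag", "woensdag", "donderdag", "vrijdag", "zaterdag", "zondag"]
--
-- def _select_strength_days(all_sessions: list, long_run_dag: str) -> list[str]:
--     """Same selection, but one pass over the sessions instead of grouping by
--     day and rescanning per day."""
--     hard_keywords = ("threshold", "drempel", "marathon_tempo", "tempo_duurloop",
--                      "cp_intervals", "vo2max", "interval", "over_unders",
--                      "over-unders", "pyramide", "surges", "vo2", "sweetspot")
--
--     # One pass: collect the days (within the week) that carry a hard session.
--     hard_days: set[str] = set()
--     for s in all_sessions: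
--         sessie_type = (s.get("type") or "").lower()
--         naam = (s.get("naam") or "").lower()
--         if any(k in sessie_type or k in naam for k in hard_keywords):
--             dag = s["dag"]
--             if dag in DAYS_NL:
--                 hard_days.add(dag)
--
--     day_idx = {d: i for i, d in enumerate(DAYS_NL)}
--     forbidden: set[str] = {long_run_dag} if long_run_dag else set()
--     for dag in hard_days:
--         forbidden.add(dag)
--         i = day_idx[dag]
--         if i > 0:
--             forbidden.add(DAYS_NL[i - 1])
--
--     candidates: list[str] = []
--     last_picked_idx = -10
--     for i, dag in enumerate(DAYS_NL):
--         if dag in forbidden: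
--             continue
--         if i - last_picked_idx >= 2:
--             candidates.append(dag)
--             last_picked_idx = i
--         if len(candidates) >= 3:
--             break
--     return candidates
-- ===== Notes on version B (the rewrite author's own statement) =====
-- stated objective: simpler
-- what changed: B makes a single pass over the sessions collecting the set of week-days that carry a hard (interval/threshold-keyword) session, then derives the forbidden set from that set with a precomputed day->index map, instead of A's grouping of all sessions into a by-day dict and rescanning the grouped sessions for every weekday; the final greedy day-picking loop is unchanged.
import Mathlib
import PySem

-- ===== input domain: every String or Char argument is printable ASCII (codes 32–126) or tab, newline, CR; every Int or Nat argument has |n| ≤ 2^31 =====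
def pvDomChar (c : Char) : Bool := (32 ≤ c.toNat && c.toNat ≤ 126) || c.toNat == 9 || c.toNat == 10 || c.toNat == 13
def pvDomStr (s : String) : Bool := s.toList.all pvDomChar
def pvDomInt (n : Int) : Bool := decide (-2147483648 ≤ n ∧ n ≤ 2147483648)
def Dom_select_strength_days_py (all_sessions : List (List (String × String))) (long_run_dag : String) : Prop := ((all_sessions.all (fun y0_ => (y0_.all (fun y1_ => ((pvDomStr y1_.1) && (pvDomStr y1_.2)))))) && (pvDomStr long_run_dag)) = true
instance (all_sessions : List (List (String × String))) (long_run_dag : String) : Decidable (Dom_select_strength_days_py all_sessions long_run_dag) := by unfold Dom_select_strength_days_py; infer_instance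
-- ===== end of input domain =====

-- B is one pass over the sessions (collect hard days, then derive forbidden) instead of
-- grouping sessions by day and rescanning each weekday; equal RETURN value is what is proved.

-- shared module constant DAYS_NL
def pvDays : List String :=
  ["maandag", "dinsdag", "woensdag", "donderdag", "vrijdag", "zaterdag", "zondag"]

-- shared: the hard_keywords tuple (identical in both Pythons)
def pvHardKeywords : List String :=
  ["threshold", "drempel", "marathon_tempo", "tempo_duurloop",
   "cp_intervals", "vo2max", "interval", "over_unders",
   "over-unders", "pyramide", "surges", "vo2", "sweetspot"]

-- shared: s["dag"] (total form; Pre_ guarantees the key is present)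
def pvDag (s : List (String × String)) : String :=
  ((PySem.Dict.mk s).get? "dag").getD ""

-- shared: sessie_type = (s.get("type") or "").lower(); naam likewise;
-- any(k in sessie_type or k in naam for k in hard_keywords)  (identical in both Pythons)
def pvSessionHard (s : List (String × String)) : Bool :=
  pvHardKeywords.any (fun k =>
    PySem.Str.isIn k (PySem.Str.lower (((PySem.Dict.mk s).get? "type").getD "")) ||
    PySem.Str.isIn k (PySem.Str.lower (((PySem.Dict.mk s).get? "naam").getD "")))

-- shared: the candidate-selection loop (B keeps A's greedy loop unchanged)
def pvGreedy : List (Int × String) → PySem.Set String → List String → Int → List String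
  | [], _, cands, _ => cands
  | p :: rest, forb, cands, last =>
    if forb.contains p.2 then pvGreedy rest forb cands last
    else
      let cands' := if p.1 - last ≥ 2 then cands ++ [p.2] else cands
      let last' := if p.1 - last ≥ 2 then p.1 else last
      if cands'.length ≥ 3 then cands' else pvGreedy rest forb cands' last'

-- ===== PORT A =====
-- _day_is_hard(dag)
def pvDayIsHard (sbd : PySem.Dict String (List (List (String × String)))) (dag : String) : Bool :=
  (sbd.getD dag []).any pvSessionHard

-- body of A's forbidden-building loop over enumerate(DAYS_NL)
def pvStepA (sbd : PySem.Dict String (List (List (String × String))))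
    (f : PySem.Set String) (p : Int × String) : PySem.Set String :=
  if pvDayIsHard sbd p.2 then
    let f' := PySem.Set.add f p.2
    if p.1 > 0 then PySem.Set.add f' ((PySem.List.pyGet? pvDays (p.1 - 1)).getD "") else f'
  else f

def select_strength_days_py (all_sessions : List (List (String × String))) (long_run_dag : String) : List String :=
  let sbd := all_sessions.foldl (fun d s => d.modify (pvDag s) [] (· ++ [s])) PySem.Dict.empty
  let forb0 : PySem.Set String :=
    if long_run_dag = "" then PySem.Set.empty else PySem.Set.add PySem.Set.empty long_run_dag
  let forb := (PySem.List.enumerate pvDays).foldl (pvStepA sbd) forb0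
  pvGreedy (PySem.List.enumerate pvDays) forb [] (-10)

-- ===== PORT B =====
-- day_idx = {d: i for i, d in enumerate(DAYS_NL)}
def pvDayIdx : PySem.Dict String Int :=
  PySem.Dict.ofList ((PySem.List.enumerate pvDays).map (fun p => (p.2, p.1)))

-- body of B's one pass over the sessions
def pvCollect (hd : PySem.Set String) (s : List (String × String)) : PySem.Set String :=
  if pvSessionHard s then
    (if pvDays.contains (pvDag s) then PySem.Set.add hd (pvDag s) else hd)
  else hd

-- body of B's forbidden-building loop over hard_days
def pvStepB (f : PySem.Set String) (dag : String) : PySem.Set String :=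
  let f' := PySem.Set.add f dag
  let i := (pvDayIdx.get? dag).getD 0
  if i > 0 then PySem.Set.add f' ((PySem.List.pyGet? pvDays (i - 1)).getD "") else f'

def select_strength_days_py_alt (all_sessions : List (List (String × String))) (long_run_dag : String) : List String :=
  let hard_days := all_sessions.foldl pvCollect PySem.Set.empty
  let forb0 : PySem.Set String :=
    if long_run_dag = "" then PySem.Set.empty else PySem.Set.add PySem.Set.empty long_run_dag
  let forb := hard_days.foldl pvStepB forb0
  pvGreedy (PySem.List.enumerate pvDays) forb [] (-10)

-- ===== PRECONDITION & SPEC =====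
-- Pre_ excludes exactly the inputs where Python A raises KeyError: a session without the "dag" key.
def Pre_select_strength_days_py (all_sessions : List (List (String × String))) (long_run_dag : String) : Prop :=
  (all_sessions.all (fun s => ((PySem.Dict.mk s).get? "dag").isSome)) = true
instance (all_sessions : List (List (String × String))) (long_run_dag : String) : Decidable (Pre_select_strength_days_py all_sessions long_run_dag) := by unfold Pre_select_strength_days_py; infer_instance

def pvWitness_select_strength_days_py : (List (List (String × String))) × String :=
  ([[("dag", "dinsdag"), ("type", "vo2max_intervals")], [("dag", "zaterdag"), ("naam", "rustig")]], "zondag")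

def Spec_select_strength_days_py (all_sessions : List (List (String × String))) (long_run_dag : String) (out : List String) : Prop := out = select_strength_days_py_alt all_sessions long_run_dag
instance (all_sessions : List (List (String × String))) (long_run_dag : String) (out : List String) : Decidable (Spec_select_strength_days_py all_sessions long_run_dag out) := by unfold Spec_select_strength_days_py; infer_instance

-- ===== CLAIM (what is proved, stated in full; the proofs are below) =====
def Claim_equal_select_strength_days_py : Prop := ∀ (all_sessions : List (List (String × String))) (long_run_dag : String), Dom_select_strength_days_py all_sessions long_run_dag → Pre_select_strength_days_py all_sessions long_run_dag → Spec_select_strength_days_py all_sessions long_run_dag (select_strength_days_py all_sessions long_run_dag)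

-- ===== LEMMAS AND PROOFS =====

-- the semantic "day x carries a hard session" predicate
def pvH (all_sessions : List (List (String × String))) (x : String) : Prop :=
  ∃ s ∈ all_sessions, pvDag s = x ∧ pvSessionHard s = true

lemma dayIsHard_iff (all_sessions : List (List (String × String))) (dag : String) :
    pvDayIsHard (all_sessions.foldl (fun d s => d.modify (pvDag s) [] (· ++ [s])) PySem.Dict.empty) dag = true
      ↔ pvH all_sessions dag := by
  unfold pvDayIsHard
  rw [show all_sessions.foldl (fun d s => d.modify (pvDag s) [] (· ++ [s])) PySem.Dict.empty
      = (all_sessions.map (fun s => (pvDag s, s))).foldl (fun d p => d.modify p.1 [] (· ++ [p.2])) PySem.Dict.empty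
    from (List.foldl_map (f := fun s => (pvDag s, s))
      (g := fun (d : PySem.Dict String (List (List (String × String)))) p => d.modify p.1 [] fun x => x ++ [p.2])).symm]
  rw [PySem.Dict.getD_foldl_modify_append]
  simp only [PySem.Dict.getD_empty]
  simp [List.any_map, List.any_eq_true, pvH, Function.comp]

lemma mem_collect (all_sessions : List (List (String × String))) (hd : PySem.Set String) (x : String) :
    x ∈ all_sessions.foldl pvCollect hd ↔ x ∈ hd ∨ (pvH all_sessions x ∧ x ∈ pvDays) := by
  induction all_sessions generalizing hd with
  | nil => simp [pvH]
  | cons s l ih =>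
    simp only [List.foldl_cons, ih, pvCollect, pvH, List.mem_cons]
    split_ifs with h1 h2
    · simp only [PySem.Set.mem_add]
      constructor
      · rintro (⟨hx | hx⟩ | ⟨⟨t, ht, hd2, hh⟩, hin⟩)
        · exact Or.inl hx
        · subst hx; exact Or.inr ⟨⟨s, Or.inl rfl, rfl, h1⟩, by simpa using h2⟩
        · exact Or.inr ⟨⟨t, Or.inr ht, hd2, hh⟩, hin⟩
      · rintro (hx | ⟨⟨t, (rfl | ht), hd2, hh⟩, hin⟩)
        · exact Or.inl (Or.inl hx)
        · exact Or.inl (Or.inr hd2.symm)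
        · exact Or.inr ⟨⟨t, ht, hd2, hh⟩, hin⟩
    · constructor
      · rintro (hx | ⟨⟨t, ht, hd2, hh⟩, hin⟩)
        · exact Or.inl hx
        · exact Or.inr ⟨⟨t, Or.inr ht, hd2, hh⟩, hin⟩
      · rintro (hx | ⟨⟨t, (rfl | ht), hd2, hh⟩, hin⟩)
        · exact Or.inl hx
        · exact absurd (hd2 ▸ hin) (by simpa using h2)
        · exact Or.inr ⟨⟨t, ht, hd2, hh⟩, hin⟩
    · constructor
      · rintro (hx | ⟨⟨t, ht, hd2, hh⟩, hin⟩)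
        · exact Or.inl hx
        · exact Or.inr ⟨⟨t, Or.inr ht, hd2, hh⟩, hin⟩
      · rintro (hx | ⟨⟨t, (rfl | ht), hd2, hh⟩, hin⟩)
        · exact Or.inl hx
        · exact absurd hh (by simpa using h1)
        · exact Or.inr ⟨⟨t, ht, hd2, hh⟩, hin⟩

lemma mem_foldl_stepA (sbd : PySem.Dict String (List (List (String × String))))
    (l : List (Int × String)) (f0 : PySem.Set String) (x : String) :
    x ∈ l.foldl (pvStepA sbd) f0 ↔ x ∈ f0 ∨
      ∃ p ∈ l, pvDayIsHard sbd p.2 = true ∧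
        (x = p.2 ∨ (p.1 > 0 ∧ x = (PySem.List.pyGet? pvDays (p.1 - 1)).getD "")) := by
  induction l generalizing f0 with
  | nil => simp
  | cons p rest ih =>
    simp only [List.foldl_cons, ih, pvStepA, List.mem_cons]
    split_ifs with h1 h2
    · simp only [PySem.Set.mem_add]
      constructor
      · rintro (((hx | hx) | hx) | ⟨q, hq, hh, hd⟩)
        · exact Or.inl hx
        · exact Or.inr ⟨p, Or.inl rfl, h1, Or.inl hx⟩
        · exact Or.inr ⟨p, Or.inl rfl, h1, Or.inr ⟨h2, hx⟩⟩
        · exact Or.inr ⟨q, Or.inr hq, hh, hd⟩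
      · rintro (hx | ⟨q, (rfl | hq), hh, (hd | ⟨hpos, hd⟩)⟩)
        · exact Or.inl (Or.inl (Or.inl hx))
        · exact Or.inl (Or.inl (Or.inr hd))
        · exact Or.inl (Or.inr hd)
        · exact Or.inr ⟨q, hq, hh, Or.inl hd⟩
        · exact Or.inr ⟨q, hq, hh, Or.inr ⟨hpos, hd⟩⟩
    · simp only [PySem.Set.mem_add]
      constructor
      · rintro ((hx | hx) | ⟨q, hq, hh, hd⟩)
        · exact Or.inl hx
        · exact Or.inr ⟨p, Or.inl rfl, h1, Or.inl hx⟩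
        · exact Or.inr ⟨q, Or.inr hq, hh, hd⟩
      · rintro (hx | ⟨q, (rfl | hq), hh, (hd | ⟨hpos, hd⟩)⟩)
        · exact Or.inl (Or.inl hx)
        · exact Or.inl (Or.inr hd)
        · exact absurd hpos h2
        · exact Or.inr ⟨q, hq, hh, Or.inl hd⟩
        · exact Or.inr ⟨q, hq, hh, Or.inr ⟨hpos, hd⟩⟩
    · constructor
      · rintro (hx | ⟨q, hq, hh, hd⟩)
        · exact Or.inl hx
        · exact Or.inr ⟨q, Or.inr hq, hh, hd⟩
      · rintro (hx | ⟨q, (rfl | hq), hh, hd⟩)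
        · exact Or.inl hx
        · exact absurd hh h1
        · exact Or.inr ⟨q, hq, hh, hd⟩

lemma mem_foldl_stepB (l : List String) (f0 : PySem.Set String) (x : String) :
    x ∈ l.foldl pvStepB f0 ↔ x ∈ f0 ∨
      ∃ d ∈ l, x = d ∨ (((pvDayIdx.get? d).getD 0) > 0 ∧
        x = (PySem.List.pyGet? pvDays (((pvDayIdx.get? d).getD 0) - 1)).getD "") := by
  induction l generalizing f0 with
  | nil => simp
  | cons d rest ih =>
    simp only [List.foldl_cons, ih, pvStepB, List.mem_cons]
    split_ifs with h1
    · simp only [PySem.Set.mem_add]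
      constructor
      · rintro (((hx | hx) | hx) | ⟨q, hq, hd⟩)
        · exact Or.inl hx
        · exact Or.inr ⟨d, Or.inl rfl, Or.inl hx⟩
        · exact Or.inr ⟨d, Or.inl rfl, Or.inr ⟨h1, hx⟩⟩
        · exact Or.inr ⟨q, Or.inr hq, hd⟩
      · rintro (hx | ⟨q, (rfl | hq), (hd | ⟨hpos, hd⟩)⟩)
        · exact Or.inl (Or.inl (Or.inl hx))
        · exact Or.inl (Or.inl (Or.inr hd))
        · exact Or.inl (Or.inr hd)
        · exact Or.inr ⟨q, hq, Or.inl hd⟩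
        · exact Or.inr ⟨q, hq, Or.inr ⟨hpos, hd⟩⟩
    · simp only [PySem.Set.mem_add]
      constructor
      · rintro ((hx | hx) | ⟨q, hq, hd⟩)
        · exact Or.inl hx
        · exact Or.inr ⟨d, Or.inl rfl, Or.inl hx⟩
        · exact Or.inr ⟨q, Or.inr hq, hd⟩
      · rintro (hx | ⟨q, (rfl | hq), (hd | ⟨hpos, hd⟩)⟩)
        · exact Or.inl (Or.inl hx)
        · exact Or.inl (Or.inr hd)
        · exact absurd hpos h1
        · exact Or.inr ⟨q, hq, Or.inl hd⟩
        · exact Or.inr ⟨q, hq, Or.inr ⟨hpos, hd⟩⟩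

lemma greedy_congr (l : List (Int × String)) (f1 f2 : PySem.Set String)
    (h : ∀ y, f1.contains y = f2.contains y) (cands : List String) (last : Int) :
    pvGreedy l f1 cands last = pvGreedy l f2 cands last := by
  induction l generalizing cands last with
  | nil => rfl
  | cons p rest ih =>
    simp only [pvGreedy, h p.2]
    split_ifs <;> simp [ih]

lemma forb_eq (all_sessions : List (List (String × String))) (forb0 : PySem.Set String) (y : String) :
    ((PySem.List.enumerate pvDays).foldl
        (pvStepA (all_sessions.foldl (fun d s => d.modify (pvDag s) [] (· ++ [s])) PySem.Dict.empty)) forb0).contains y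
      = ((all_sessions.foldl pvCollect PySem.Set.empty).foldl pvStepB forb0).contains y := by
  have hidx : ∀ p ∈ PySem.List.enumerate pvDays, (pvDayIdx.get? p.2).getD 0 = p.1 := by decide
  have hsnd : ∀ p ∈ PySem.List.enumerate pvDays, p.2 ∈ pvDays := by decide
  have henum : ∀ d ∈ pvDays, ((pvDayIdx.get? d).getD 0, d) ∈ PySem.List.enumerate pvDays := by decide
  rw [Bool.eq_iff_iff, PySem.Set.contains_iff, PySem.Set.contains_iff,
      mem_foldl_stepA, mem_foldl_stepB]
  apply or_congr Iff.rfl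
  constructor
  · rintro ⟨p, hp, hhard, hdisj⟩
    refine ⟨p.2, ?_, ?_⟩
    · rw [mem_collect]
      exact Or.inr ⟨(dayIsHard_iff all_sessions p.2).mp hhard, hsnd p hp⟩
    · rw [hidx p hp]; exact hdisj
  · rintro ⟨d, hd, hdisj⟩
    rw [mem_collect] at hd
    rcases hd with h | ⟨hH, hmem⟩
    · exact absurd h (by simp [PySem.Set.empty])
    exact ⟨((pvDayIdx.get? d).getD 0, d), henum d hmem,
      (dayIsHard_iff all_sessions d).mpr hH, hdisj⟩

-- ===== VERDICT (by name: the statement is the Claim_ definition above) =====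
theorem select_strength_days_py_spec : Claim_equal_select_strength_days_py := by
  intro all_sessions long_run_dag _ _
  unfold Spec_select_strength_days_py select_strength_days_py select_strength_days_py_alt
  exact greedy_congr _ _ _ (forb_eq all_sessions _) [] (-10)
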